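-- pv_equiv track=rewrite | github.com/m1crochip/Data_Structure | LAB1/LAB1_13072019/LAB1_13072019/LAB1_13072019.py | gen_pattern
-- ===== SOURCE A (Python) =====
-- def line(s):
--     ans = ''
--     for i in range(1,len(s)):
--         ans = s[i]+ans
--     ans = ans + s
--     ans = '.'.join(ans)
--     ans = ans
--     return ans
--
-- def gen_pattern(c):
--     n = (2*len(c)-1)+(2*len(c)-2)
--     mid = line(c)+'\n'
--     for i in range(1,len(c)):
--         a = line(c[i:len(c)])
--         a = a.center(n,'.')
--         a = a + '\n'
--         mid = a + mid + a
--     return mid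
-- ===== SOURCE B (Python) =====
-- def gen_pattern(c):
--     L = len(c)
--     n = 4 * L - 3
--     m = L - 1
--     out = []
--     for r in range(2 * L - 1):
--         d = abs(r - m)
--         for col in range(n):
--             if col % 2 == 0 and 2 * d <= col <= n - 1 - 2 * d:
--                 out.append(c[d + abs(col // 2 - m)])
--             else:
--                 out.append('.')
--         out.append('\n')
--     return ''.join(out)
-- ===== Notes on version B (the rewrite author's own statement) =====
-- stated objective: alternative
-- what changed: B computes the diamond as a coordinate grid, deriving each character of each row directly from (row, col) arithmetic (column parity, distance to the centre column) with no line/center string helpers, instead of A's center-outward bidirectional accumulation mid = a + mid + a of centered line() strings.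
-- outside the precondition, e.g. on gen_pattern(''): A returns '\n', B returns ''
import Mathlib
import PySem

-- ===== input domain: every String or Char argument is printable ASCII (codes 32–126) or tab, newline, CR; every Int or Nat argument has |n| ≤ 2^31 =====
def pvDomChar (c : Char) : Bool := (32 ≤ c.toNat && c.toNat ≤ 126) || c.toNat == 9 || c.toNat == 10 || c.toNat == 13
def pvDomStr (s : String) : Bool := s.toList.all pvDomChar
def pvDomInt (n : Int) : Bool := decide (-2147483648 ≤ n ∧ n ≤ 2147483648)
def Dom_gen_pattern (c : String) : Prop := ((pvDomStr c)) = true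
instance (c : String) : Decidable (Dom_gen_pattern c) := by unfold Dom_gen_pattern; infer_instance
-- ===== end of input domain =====

-- B computes the diamond as a coordinate grid — each character derived arithmetically from its
-- (row, col) position — instead of A's center-outward accumulation of centered line() strings.

-- ===== PORT A =====
-- the Python helper `line` of Source A
def lineP (s : List Char) : List Char :=
  let ans : List Char :=
    (PySem.List.pyRange 1 (s.length : Int) 1).foldl
      (fun ans i =>
        -- s[i] with i drawn from range(1, len(s)): always in bounds, `none` unreachable
        match PySem.List.pyGet? s i with
        | some ch => ch :: ans
        | none => ans) []
  let ans := ans ++ s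
  PySem.Chars.join ['.'] (ans.map (fun ch => [ch]))

-- hand port of str.center(width, fill); exact (CPython: left pad = marg//2 + (marg & width & 1),
-- the bitwise term written as the equivalent both-odd parity test since marg > 0 forces width > 0)
def centerP (s : List Char) (width : Int) (fill : Char) : List Char :=
  let marg := width - (s.length : Int)
  if marg ≤ 0 then s
  else
    let left := PySem.Int.floordiv marg 2 +
      (if PySem.Int.mod marg 2 = 1 ∧ PySem.Int.mod width 2 = 1 then 1 else 0)
    List.replicate left.toNat fill ++ s ++ List.replicate (marg - left).toNat fill

def gen_pattern (c : String) : String :=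
  let cs := c.toList
  let n : Int := (2 * (cs.length : Int) - 1) + (2 * (cs.length : Int) - 2)
  let mid := lineP cs ++ ['\n']
  let mid := (PySem.List.pyRange 1 (cs.length : Int) 1).foldl
    (fun mid i =>
      let a := lineP (PySem.List.slice cs (some i) (some (cs.length : Int)))
      let a := centerP a n '.'
      let a := a ++ ['\n']
      a ++ mid ++ a) mid
  String.ofList mid

-- ===== PORT B =====
def gen_pattern_alt (c : String) : String :=
  let cs := c.toList
  let L : Int := (cs.length : Int)
  let n : Int := 4 * L - 3
  let m : Int := L - 1
  let out := (PySem.List.pyRange 0 (2 * L - 1) 1).foldl (fun out r =>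
    let d := |r - m|
    let out := (PySem.List.pyRange 0 n 1).foldl (fun out col =>
      if PySem.Int.mod col 2 = 0 ∧ 2 * d ≤ col ∧ col ≤ n - 1 - 2 * d then
        -- c[d + abs(col//2 - m)]: the guard keeps the index in range, `getD` default unreachable
        out ++ [(PySem.List.pyGet? cs (d + |PySem.Int.floordiv col 2 - m|)).getD '.']
      else out ++ ['.']) out
    out ++ ['\n']) []
  String.ofList out

-- ===== PRECONDITION & SPEC =====
-- Pre_ excludes only the empty string, the degenerate corner where A returns one blank
-- newline-terminated line while the natural grid construction returns no rows at all; both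
-- are defensible readings of an empty diamond, so that accidental corner is excluded.
def Pre_gen_pattern (c : String) : Prop := c ≠ ""
instance (c : String) : Decidable (Pre_gen_pattern c) := by unfold Pre_gen_pattern; infer_instance
def pvWitness_gen_pattern : String := "ab"

def Spec_gen_pattern (c : String) (out : String) : Prop := out = gen_pattern_alt c
instance (c : String) (out : String) : Decidable (Spec_gen_pattern c out) := by unfold Spec_gen_pattern; infer_instance

-- ===== CLAIM (what is proved, stated in full; the proofs are below) =====
def Claim_equal_gen_pattern : Prop := ∀ (c : String), Dom_gen_pattern c → Pre_gen_pattern c → Spec_gen_pattern c (gen_pattern c)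

-- ===== LEMMAS AND PROOFS =====

-- Nat distance |a - b|
def pvDist (a b : Nat) : Nat := if a ≤ b then b - a else a - b

-- the grid cell of B at row-distance d, column j, in Nat form
def pvCell (cs : List Char) (d j : Nat) : Char :=
  if j % 2 = 0 ∧ 2 * d ≤ j ∧ j + 2 * d + 4 ≤ 4 * cs.length then
    cs.getD (d + pvDist (j / 2) (cs.length - 1)) '.'
  else '.'

-- one newline-terminated row of A at row-distance d
def pvRowA (cs : List Char) (d : Nat) : List Char :=
  centerP (lineP (cs.drop d)) (4 * (cs.length : Int) - 3) '.' ++ ['\n']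

-- row-distance of row r from the middle row L-1
def pvDOf (L r : Nat) : Nat := if r ≤ L - 1 then L - 1 - r else r - (L - 1)

-- range(1, L) as a map over List.range (L-1)
lemma pv_up_eq (L : Nat) :
    PySem.List.pyRange 1 (L : Int) 1 = (List.range (L - 1)).map (fun k : Nat => (k : Int) + 1) := by
  rw [PySem.List.pyRange_one]
  have hc : ((L : Int) - 1).toNat = L - 1 := by omega
  rw [hc]
  apply List.map_congr_left
  intro k _
  ring

-- symmetric accumulation  mid := a ++ mid ++ a  unrolled to a flattened prefix/suffix
lemma pv_foldl_sym {ι : Type} (g : ι → List Char) (l : List ι) (m : List Char) :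
    l.foldl (fun mid i => g i ++ mid ++ g i) m
      = (l.reverse.map g).flatten ++ m ++ (l.map g).flatten := by
  induction l generalizing m with
  | nil => simp
  | cons x l ih =>
    rw [List.foldl_cons, ih]
    simp [List.append_assoc]

-- c[i:len(c)] and c[i:] agree for the nonnegative i the A-loop uses
lemma pv_slice_eq (cs : List Char) (k : Nat) :
    PySem.List.slice cs (some ((k : Int) + 1)) (some (cs.length : Int))
      = cs.drop (k + 1) := by
  have h1 : ((k : Int) + 1) = ((k + 1 : Nat) : Int) := by push_cast; ring
  rw [h1, PySem.List.slice_natCast]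
  calc List.take (cs.length - (k + 1)) (List.drop (k + 1) cs)
      = List.take (List.drop (k + 1) cs).length (List.drop (k + 1) cs) := by
        rw [List.length_drop]
    _ = List.drop (k + 1) cs := List.take_length ..

-- |↑a - ↑b| over Int is the Nat distance
lemma pv_abs_sub (a b : Nat) : |(a : Int) - (b : Int)| = ((pvDist a b : Nat) : Int) := by
  unfold pvDist
  split
  · rw [abs_of_nonpos (by omega)]; omega
  · rw [abs_of_nonneg (by omega)]; omega

lemma pv_map_getD_drop (s : List Char) :
    (List.range (s.length - 1)).map (fun k => s.getD (k + 1) '.') = s.drop 1 := by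
  apply List.ext_getElem
  · simp
  · intro i h1 h2
    simp only [List.length_map, List.length_range] at h1
    simp only [List.getElem_map, List.getElem_range, List.getElem_drop,
      List.getD_eq_getElem?_getD, List.getElem?_eq_getElem (show i + 1 < s.length by omega)]
    simp [Nat.add_comm]

-- the fold inside line() builds (s.drop 1).reverse
lemma pv_line_fold (s : List Char) :
    (PySem.List.pyRange 1 (s.length : Int) 1).foldl
      (fun ans i => match PySem.List.pyGet? s i with
        | some ch => ch :: ans
        | none => ans) []
      = (s.drop 1).reverse := by
  rw [pv_up_eq, List.foldl_map]
  suffices h : ∀ (m : Nat), m ≤ s.length - 1 → ∀ acc : List Char,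
      (List.range m).foldl (fun (x : List Char) (y : Nat) =>
        match PySem.List.pyGet? s ((y : Int) + 1) with
        | some ch => ch :: x
        | none => x) acc
      = ((List.range m).map (fun k => s.getD (k + 1) '.')).reverse ++ acc by
    rw [h (s.length - 1) le_rfl [], pv_map_getD_drop, List.append_nil]
  intro m hm
  induction m with
  | zero => intro acc; simp
  | succ m ih =>
    intro acc
    rw [List.range_succ, List.foldl_append, List.map_append]
    rw [ih (by omega)]
    simp only [List.foldl_cons, List.foldl_nil, List.map_cons, List.map_nil]
    have h1 : ((m : Int) + 1) = ((m + 1 : Nat) : Int) := by push_cast; ring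
    rw [h1, PySem.List.pyGet?_natCast, List.getElem?_eq_getElem (by omega)]
    simp [List.getD_eq_getElem?_getD,
      List.getElem?_eq_getElem (show m + 1 < s.length by omega), List.reverse_append]

lemma pv_join_dot (P : List Char) (hP : P ≠ []) :
    PySem.Chars.join ['.'] (P.map (fun ch => [ch]))
      = (List.range (2 * P.length - 1)).map
          (fun j => if j % 2 = 1 then '.' else P.getD (j / 2) '.') := by
  induction P with
  | nil => simp at hP
  | cons a rest ih =>
    cases rest with
    | nil =>
      simp [PySem.Chars.join_singleton, List.range_one]
    | cons b rest2 =>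
      have hstep : PySem.Chars.join ['.'] ([b] :: List.map (fun ch => [ch]) rest2)
          = List.map (fun j => if j % 2 = 1 then '.' else (b :: rest2).getD (j / 2) '.')
            (List.range (2 * (b :: rest2).length - 1)) := ih (by simp)
      rw [List.map_cons, List.map_cons, PySem.Chars.join_cons_cons, hstep]
      simp only [List.cons_append, List.nil_append]
      have hlen : 2 * (a :: b :: rest2).length - 1 = (2 * (b :: rest2).length - 1) + 1 + 1 := by
        simp only [List.length_cons]; omega
      rw [hlen, List.range_succ_eq_map, List.range_succ_eq_map]
      simp only [List.map_cons, List.map_map]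
      refine congrArg₂ _ ?_ (congrArg₂ _ ?_ ?_)
      · norm_num
      · norm_num
      · apply List.map_congr_left
        intro j _
        simp only [Function.comp_apply, Nat.succ_eq_add_one]
        have hm2 : (j + 1 + 1) % 2 = j % 2 := by omega
        have hd2 : (j + 1 + 1) / 2 = j / 2 + 1 := by omega
        rw [hm2, hd2]
        by_cases hp : j % 2 = 1
        · simp [hp]
        · simp [hp]

-- the palindrome (t.drop 1).reverse ++ t, read by Nat distance from its centre t[0]
lemma pv_pal_getD (t : List Char) (ht : t ≠ []) (u : Nat) :
    ((t.drop 1).reverse ++ t).getD u '.' = t.getD (pvDist u (t.length - 1)) '.' := by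
  have hlen : (t.drop 1).reverse.length = t.length - 1 := by simp
  have hL : 1 ≤ t.length := List.length_pos_iff.mpr ht
  rw [List.getD_eq_getElem?_getD, List.getD_eq_getElem?_getD]
  by_cases hu : u < t.length - 1
  · rw [List.getElem?_append_left (by omega)]
    rw [List.getElem?_reverse (by simp; omega)]
    simp only [List.length_drop, List.getElem?_drop]
    have hidx : 1 + (t.length - 1 - 1 - u) = pvDist u (t.length - 1) := by
      unfold pvDist; split <;> omega
    rw [hidx]
  · rw [List.getElem?_append_right (by omega)]
    have hidx : u - (t.drop 1).reverse.length = pvDist u (t.length - 1) := by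
      rw [hlen]; unfold pvDist; split <;> omega
    rw [hidx]

-- line(t) characterised pointwise
lemma pv_line_eq (t : List Char) (ht : t ≠ []) :
    lineP t = (List.range (4 * t.length - 3)).map
      (fun j => if j % 2 = 1 then '.' else t.getD (pvDist (j / 2) (t.length - 1)) '.') := by
  have hL : 1 ≤ t.length := List.length_pos_iff.mpr ht
  have hP : (t.drop 1).reverse ++ t ≠ [] := by
    intro h; exact ht (by simpa using List.append_eq_nil_iff.mp h |>.2)
  simp only [lineP, pv_line_fold]
  rw [pv_join_dot _ hP]
  have hlen : ((t.drop 1).reverse ++ t).length = 2 * t.length - 1 := by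
    simp; omega
  rw [hlen]
  have hr : 2 * (2 * t.length - 1) - 1 = 4 * t.length - 3 := by omega
  rw [hr]
  apply List.map_congr_left
  intro j _
  by_cases hp : j % 2 = 1
  · simp [hp]
  · simp only [hp, if_false]
    rw [pv_pal_getD t ht]

lemma pv_line_len (t : List Char) (ht : t ≠ []) : (lineP t).length = 4 * t.length - 3 := by
  rw [pv_line_eq t ht]; simp

-- center() of a row of the right width is symmetric padding by 2d dots
lemma pv_center_eq (s : List Char) (L d : Nat) (_hL : 1 ≤ L) (hd : d + 1 ≤ L)
    (hs : s.length = 4 * (L - d) - 3) :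
    centerP s (4 * (L : Int) - 3) '.'
      = List.replicate (2 * d) '.' ++ s ++ List.replicate (2 * d) '.' := by
  have hm : (s.length : Int) = 4 * (L : Int) - 4 * (d : Int) - 3 := by omega
  simp only [centerP]
  by_cases hd0 : d = 0
  · subst hd0
    rw [if_pos (by omega)]
    simp
  · rw [if_neg (by omega)]
    rw [PySem.Int.floordiv_eq_ediv_of_pos (by norm_num),
        PySem.Int.mod_eq_emod_of_pos (by norm_num),
        PySem.Int.mod_eq_emod_of_pos (by norm_num)]
    rw [if_neg (by omega)]
    have h2 : ((4 * (L : Int) - 3 - ↑s.length) / 2 + 0).toNat = 2 * d := by omega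
    have h3 : (4 * (L : Int) - 3 - ↑s.length - ((4 * (L : Int) - 3 - ↑s.length) / 2 + 0)).toNat
        = 2 * d := by omega
    rw [h2, h3]

-- THE GRID ROW IS A'S CENTERED LINE: B's cells at row-distance d assemble A's row
lemma pv_row_eq (cs : List Char) (d : Nat) (hcs : cs ≠ []) (hd : d + 1 ≤ cs.length) :
    (List.range (4 * cs.length - 3)).map (pvCell cs d)
      = centerP (lineP (cs.drop d)) (4 * (cs.length : Int) - 3) '.' := by
  have hL : 1 ≤ cs.length := List.length_pos_iff.mpr hcs
  have ht : cs.drop d ≠ [] := by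
    intro h; have := congrArg List.length h; simp at this; omega
  have htl : (cs.drop d).length = cs.length - d := by simp
  have hlen : (lineP (cs.drop d)).length = 4 * (cs.length - d) - 3 := by
    rw [pv_line_len _ ht, htl]
  rw [pv_center_eq (lineP (cs.drop d)) cs.length d hL hd hlen]
  apply List.ext_getElem
  · simp only [List.length_map, List.length_range, List.length_append,
      List.length_replicate, hlen]
    omega
  · intro j h1 h2
    simp only [List.length_map, List.length_range] at h1
    simp only [List.getElem_map, List.getElem_range]
    by_cases hj1 : j < 2 * d
    · rw [List.getElem_append_left (by simp [hlen]; omega),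
          List.getElem_append_left (by simp; omega), List.getElem_replicate]
      unfold pvCell
      rw [if_neg (by omega)]
    · by_cases hj2 : j < 2 * d + (4 * (cs.length - d) - 3)
      · rw [List.getElem_append_left (by simp [hlen]; omega),
            List.getElem_append_right (by simp; omega)]
        simp only [List.length_replicate]
        have hjl : j - 2 * d < (lineP (cs.drop d)).length := by rw [hlen]; omega
        rw [List.getElem_of_eq (pv_line_eq (cs.drop d) ht) (by simpa [pv_line_eq (cs.drop d) ht] using hjl)]
        rw [List.getElem_map, List.getElem_range, htl]
        by_cases hp : j % 2 = 1
        · rw [if_pos (by omega)]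
          unfold pvCell
          rw [if_neg (by omega)]
        · rw [if_neg (by omega)]
          unfold pvCell
          rw [if_pos (by omega)]
          rw [List.getD_eq_getElem?_getD, List.getD_eq_getElem?_getD, List.getElem?_drop]
          have hidx : d + pvDist ((j - 2 * d) / 2) (cs.length - d - 1)
              = d + pvDist (j / 2) (cs.length - 1) := by
            unfold pvDist; split <;> split <;> omega
          rw [hidx]
      · rw [List.getElem_append_right (by simp [hlen]; omega), List.getElem_replicate]
        unfold pvCell
        rw [if_neg (by omega)]

-- the middle row needs no padding
lemma pv_rowA_zero (cs : List Char) (hcs : cs ≠ []) :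
    pvRowA cs 0 = lineP cs ++ ['\n'] := by
  have hlen := pv_line_len cs hcs
  have hL : 1 ≤ cs.length := List.length_pos_iff.mpr hcs
  simp only [pvRowA, List.drop_zero, centerP]
  rw [if_pos (by omega)]

-- A assembled: reversed top half ++ middle ++ top half
lemma pv_A_eq (cs : List Char) (hcs : cs ≠ []) :
    gen_pattern (String.ofList cs)
      = String.ofList
          ((((List.range (cs.length - 1)).map (fun k => pvRowA cs (k + 1))).reverse).flatten
            ++ pvRowA cs 0
            ++ ((List.range (cs.length - 1)).map (fun k => pvRowA cs (k + 1))).flatten) := by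
  have hn : (2 * (cs.length : Int) - 1) + (2 * (cs.length : Int) - 2)
      = 4 * (cs.length : Int) - 3 := by ring
  simp only [gen_pattern, String.toList_ofList]
  rw [pv_up_eq, List.foldl_map]
  rw [pv_foldl_sym (fun k : Nat =>
    centerP (lineP (PySem.List.slice cs (some ((k : Int) + 1)) (some (cs.length : Int))))
      ((2 * (cs.length : Int) - 1) + (2 * (cs.length : Int) - 2)) '.' ++ ['\n'])]
  have hrow : ∀ k ∈ List.range (cs.length - 1),
      centerP (lineP (PySem.List.slice cs (some ((k : Int) + 1)) (some (cs.length : Int))))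
        ((2 * (cs.length : Int) - 1) + (2 * (cs.length : Int) - 2)) '.' ++ ['\n']
      = pvRowA cs (k + 1) := by
    intro k _
    rw [pv_slice_eq, hn]
    rfl
  rw [List.map_congr_left hrow,
      List.map_congr_left (fun k hk => hrow k (by simpa using List.mem_reverse.mp hk)),
      ← List.map_reverse, pv_rowA_zero cs hcs]

-- B assembled: flattened rows indexed by row-distance
lemma pv_B_eq (cs : List Char) (hcs : cs ≠ []) :
    gen_pattern_alt (String.ofList cs)
      = String.ofList
          (((List.range (2 * cs.length - 1)).map
            (fun r => (List.range (4 * cs.length - 3)).map (pvCell cs (pvDOf cs.length r))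
              ++ ['\n'])).flatten) := by
  have hL : 1 ≤ cs.length := List.length_pos_iff.mpr hcs
  simp only [gen_pattern_alt, String.toList_ofList]
  have hinner : ∀ (dd : Int), (fun (out : List Char) (col : Int) =>
      if PySem.Int.mod col 2 = 0 ∧ 2 * dd ≤ col ∧
          col ≤ (4 * (cs.length : Int) - 3) - 1 - 2 * dd then
        out ++ [(PySem.List.pyGet? cs
          (dd + |PySem.Int.floordiv col 2 - ((cs.length : Int) - 1)|)).getD '.']
      else out ++ ['.'])
      = (fun (out : List Char) (col : Int) => out ++
          [if PySem.Int.mod col 2 = 0 ∧ 2 * dd ≤ col ∧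
              col ≤ (4 * (cs.length : Int) - 3) - 1 - 2 * dd then
            (PySem.List.pyGet? cs
              (dd + |PySem.Int.floordiv col 2 - ((cs.length : Int) - 1)|)).getD '.'
          else '.']) := by
    intro dd; funext out col; split <;> rfl
  simp only [hinner, PySem.List.foldl_append_singleton_eq_map]
  have houter : (fun (out : List Char) (r : Int) => out ++
      (PySem.List.pyRange 0 (4 * (cs.length : Int) - 3) 1).map
        (fun col => if PySem.Int.mod col 2 = 0 ∧ 2 * |r - ((cs.length : Int) - 1)| ≤ col ∧
              col ≤ (4 * (cs.length : Int) - 3) - 1 - 2 * |r - ((cs.length : Int) - 1)| then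
            (PySem.List.pyGet? cs
              (|r - ((cs.length : Int) - 1)| + |PySem.Int.floordiv col 2 - ((cs.length : Int) - 1)|)).getD '.'
          else '.') ++ ['\n'])
      = (fun (out : List Char) (r : Int) => out ++
        ((PySem.List.pyRange 0 (4 * (cs.length : Int) - 3) 1).map
          (fun col => if PySem.Int.mod col 2 = 0 ∧ 2 * |r - ((cs.length : Int) - 1)| ≤ col ∧
                col ≤ (4 * (cs.length : Int) - 3) - 1 - 2 * |r - ((cs.length : Int) - 1)| then
              (PySem.List.pyGet? cs
                (|r - ((cs.length : Int) - 1)| + |PySem.Int.floordiv col 2 - ((cs.length : Int) - 1)|)).getD '.'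
            else '.') ++ ['\n'])) := by
    funext out r; rw [List.append_assoc]
  rw [houter, PySem.List.foldl_append_eq_flatMap, List.nil_append]
  have hfm : ∀ {α β : Type} (f : α → List β) (l : List α),
      l.flatMap f = (l.map f).flatten := by
    intro α β f l; induction l with
    | nil => simp
    | cons x l ih => simp [ih]
  have h2L : PySem.List.pyRange 0 (2 * (cs.length : Int) - 1) 1
      = (List.range (2 * cs.length - 1)).map (fun r : Nat => (r : Int)) := by
    have ht : (2 * (cs.length : Int) - 1).toNat = 2 * cs.length - 1 := by omega
    rw [PySem.List.pyRange_zero, ht]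
  rw [h2L, List.flatMap_map, hfm]
  refine congrArg String.ofList (congrArg List.flatten (List.map_congr_left ?_))
  intro r hr
  simp only [List.mem_range] at hr
  have habs : |(r : Int) - ((cs.length : Int) - 1)| = ((pvDOf cs.length r : Nat) : Int) := by
    have h1 : (cs.length : Int) - 1 = ((cs.length - 1 : Nat) : Int) := by omega
    rw [h1, pv_abs_sub]
    rfl
  rw [habs]
  have h4L : PySem.List.pyRange 0 (4 * (cs.length : Int) - 3) 1
      = (List.range (4 * cs.length - 3)).map (fun j : Nat => (j : Int)) := by
    have ht : (4 * (cs.length : Int) - 3).toNat = 4 * cs.length - 3 := by omega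
    rw [PySem.List.pyRange_zero, ht]
  rw [h4L, List.map_map]
  refine congrArg (· ++ ['\n']) (List.map_congr_left ?_)
  intro j hj
  simp only [List.mem_range] at hj
  simp only [Function.comp]
  unfold pvCell
  rw [PySem.Int.mod_eq_emod_of_pos (by norm_num),
      PySem.Int.floordiv_eq_ediv_of_pos (by norm_num)]
  by_cases hc : j % 2 = 0 ∧ 2 * pvDOf cs.length r ≤ j ∧
      j + 2 * pvDOf cs.length r + 4 ≤ 4 * cs.length
  · rw [if_pos (by omega), if_pos hc]
    have hdiv : ((j : Int)) / 2 = ((j / 2 : Nat) : Int) := by omega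
    have hL1 : (cs.length : Int) - 1 = ((cs.length - 1 : Nat) : Int) := by omega
    rw [hdiv, hL1, pv_abs_sub]
    have hsum : ((pvDOf cs.length r : Nat) : Int)
        + ((pvDist (j / 2) (cs.length - 1) : Nat) : Int)
        = (((pvDOf cs.length r) + pvDist (j / 2) (cs.length - 1) : Nat) : Int) := by
      push_cast; ring
    rw [hsum, PySem.List.pyGet?_natCast, List.getD_eq_getElem?_getD]
  · rw [if_neg (by omega), if_neg hc]

-- the sequence of row-distances L-1 … 1 0 1 … L-1, split around the middle
lemma pv_seq_split {α : Type} (f : Nat → α) (L : Nat) (hL : 1 ≤ L) :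
    (List.range (2 * L - 1)).map (fun r => f (pvDOf L r))
      = ((List.range (L - 1)).map (fun k => f (k + 1))).reverse
        ++ [f 0]
        ++ (List.range (L - 1)).map (fun k => f (k + 1)) := by
  apply List.ext_getElem
  · simp; omega
  · intro i h1 h2
    simp only [List.length_map, List.length_range] at h1
    simp only [List.getElem_map, List.getElem_range]
    by_cases hi : i < L - 1
    · rw [List.getElem_append_left (by simp; omega),
          List.getElem_append_left (by simp; omega),
          List.getElem_reverse]
      simp only [List.length_map, List.length_range]
      rw [List.getElem_map, List.getElem_range]
      congr 1
      unfold pvDOf; split <;> omega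
    · by_cases hi2 : i = L - 1
      · rw [List.getElem_append_left (by simp; omega),
            List.getElem_append_right (by simp; omega)]
        simp only [List.length_map, List.length_range, List.length_reverse]
        have : pvDOf L i = 0 := by unfold pvDOf; split <;> omega
        rw [this]
        simp [hi2]
      · rw [List.getElem_append_right (by simp; omega)]
        simp only [List.length_append, List.length_map, List.length_range,
          List.length_reverse, List.length_cons, List.length_nil]
        rw [List.getElem_map, List.getElem_range]
        congr 1
        unfold pvDOf; split <;> omega

-- ===== VERDICT (by name: the statement is the Claim_ definition above) =====
theorem gen_pattern_spec : Claim_equal_gen_pattern := by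
  intro c _ hpre
  show gen_pattern c = gen_pattern_alt c
  have hcs : c.toList ≠ [] := by
    intro h
    exact hpre (String.toList_eq_nil_iff.mp h)
  have hc : String.ofList c.toList = c := by simp
  rw [← hc, pv_A_eq c.toList hcs, pv_B_eq c.toList hcs]
  congr 1
  have hrow : ∀ r ∈ List.range (2 * c.toList.length - 1),
      (List.range (4 * c.toList.length - 3)).map (pvCell c.toList (pvDOf c.toList.length r))
        ++ ['\n'] = pvRowA c.toList (pvDOf c.toList.length r) := by
    intro r hr
    unfold pvRowA
    rw [pv_row_eq c.toList _ hcs]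
    unfold pvDOf
    have hL : 1 ≤ c.toList.length := List.length_pos_iff.mpr hcs
    simp only [List.mem_range] at hr
    split <;> omega
  rw [List.map_congr_left hrow, pv_seq_split (pvRowA c.toList) _ (List.length_pos_iff.mpr hcs)]
  simp [List.append_assoc]
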